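-- pv_equiv track=rewrite | github.com/2142022/Algorithm | 프로그래머스/Python/[Lv3] 258705 산 모양 타일링/산 모양 타일링.py | solution
-- ===== SOURCE A (Python) =====
-- def solution(n, tops):
--     # 나눌 수
--     M = 10007
--
--     # 사다리꼴에 있는 정삼각형의 개수
--     N = 2 * n + 1
--
--     # 사다리꼴에 있는 각 정삼각형까지 만들 수 있는 경우의 수
--     dp = [0] * N
--     dp[0] = 1
--     dp[1] = 3 if tops[0] else 2
--     for i in range(2, N):
--         # 이전 사다리꼴까지의 경우의 수, 두 번째 전 사다리꼴까지의 경우의 수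
--         a, b = dp[i - 1], dp[i - 2]
--
--         # 이전 사다리꼴에서 정삼각형을 붙이거나, 두 번째 전 사다리꼴에서 마름모를 붙이기
--         c = (a + b) % M
--         dp[i] = c
--
--         # 현재 위치 위에 정삼각형이 있는 경우, 정삼각형을 올리거나 이전 사다리꼴에서 마름모 붙이기
--         d, m = divmod(i, 2)
--         if m and tops[d]:
--             dp[i] = (c + a) % M
--
--     return dp[-1]
-- ===== SOURCE B (Python) =====
-- def solution(n, tops):
--     M = 10007
--     # Matrix formulation: each mountain column k contributes a 2x2 transition
--     # matrix [[1, 1], [w, w+1]] with w = 2 if tops[k] else 1.  B multiplies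
--     # these matrices into a running product (a b / c d) and only at the end
--     # applies the seed row-vector (1, 1); the answer is its second component.
--     a, b, c, d = 1, 0, 0, 1
--     for k in range(n):
--         w = 2 if tops[k] else 1
--         a, b = (a + w * b) % M, (a + (w + 1) * b) % M
--         c, d = (c + w * d) % M, (c + (w + 1) * d) % M
--     return (b + d) % M
-- ===== Notes on version B (the rewrite author's own statement) =====
-- stated objective: alternative
-- what changed: B recasts the tiling count as a product of per-column 2x2 transition matrices [[1,1],[w,w+1]] (w=2 if tops[k] else 1) reduced mod 10007, applying the seed row-vector (1,1) only once at the end, instead of A's length-(2n+1) dp array filled cell-per-triangle with parity/divmod tests.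
import Mathlib
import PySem

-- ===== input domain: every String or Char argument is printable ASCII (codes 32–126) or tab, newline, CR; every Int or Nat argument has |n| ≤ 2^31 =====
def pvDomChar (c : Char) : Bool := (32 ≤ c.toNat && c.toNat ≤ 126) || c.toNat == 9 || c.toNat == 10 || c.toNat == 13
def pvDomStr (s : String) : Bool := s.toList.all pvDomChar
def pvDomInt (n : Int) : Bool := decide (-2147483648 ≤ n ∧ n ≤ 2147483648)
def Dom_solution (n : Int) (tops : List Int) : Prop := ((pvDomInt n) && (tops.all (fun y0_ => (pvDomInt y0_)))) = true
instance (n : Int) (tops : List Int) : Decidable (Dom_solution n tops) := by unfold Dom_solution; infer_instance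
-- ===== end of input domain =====

-- B recasts A's per-triangle dp array as a product of per-column 2x2 transition
-- matrices (mod 10007), applying the seed row-vector (1,1) only once at the end.

-- ===== PORT A =====
-- body of A's 'for i in range(2, N)' loop
def solutionStep (tops : List Int) (dp : List Int) (i : Int) : List Int :=
  let a := PySem.List.pyGetD dp (i - 1) 0
  let b := PySem.List.pyGetD dp (i - 2) 0
  let c := PySem.Int.mod (a + b) 10007
  let dp1 := PySem.List.pySetD dp i c
  let d := PySem.Int.floordiv i 2
  let m := PySem.Int.mod i 2
  if m ≠ 0 ∧ PySem.List.pyGetD tops d 0 ≠ 0 then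
    PySem.List.pySetD dp1 i (PySem.Int.mod (c + a) 10007)
  else dp1

def solution (n : Int) (tops : List Int) : Int :=
  let N : Int := 2 * n + 1
  let dp : List Int := List.replicate N.toNat 0
  let dp := PySem.List.pySetD dp 0 1
  let dp := PySem.List.pySetD dp 1 (if PySem.List.pyGetD tops 0 0 ≠ 0 then 3 else 2)
  let dp := (PySem.List.pyRange 2 N).foldl (solutionStep tops) dp
  PySem.List.pyGetD dp (-1) 0

-- ===== PORT B =====
-- body of B's 'for k in range(n)' loop: right-multiply the running 2x2 matrix
-- product (a b / c d) by the column matrix [[1,1],[w,w+1]], entries mod 10007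
def solutionAltStep (tops : List Int) (st : Int × Int × Int × Int) (k : Int) : Int × Int × Int × Int :=
  let w : Int := if PySem.List.pyGetD tops k 0 ≠ 0 then 2 else 1
  (PySem.Int.mod (st.1 + w * st.2.1) 10007,
   PySem.Int.mod (st.1 + (w + 1) * st.2.1) 10007,
   PySem.Int.mod (st.2.2.1 + w * st.2.2.2) 10007,
   PySem.Int.mod (st.2.2.1 + (w + 1) * st.2.2.2) 10007)

def solution_alt (n : Int) (tops : List Int) : Int :=
  let st := (PySem.List.pyRange 0 n).foldl (solutionAltStep tops) (1, 0, 0, 1)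
  PySem.Int.mod (st.2.1 + st.2.2.2) 10007

-- ===== PRECONDITION & SPEC =====
-- A raises IndexError when n ≤ 0 (dp[0] or dp[1] out of range) or len(tops) < n (tops[d] out of range)
def Pre_solution (n : Int) (tops : List Int) : Prop := 1 ≤ n ∧ n ≤ (tops.length : Int)
instance (n : Int) (tops : List Int) : Decidable (Pre_solution n tops) := by unfold Pre_solution; infer_instance

def pvWitness_solution : Int × List Int := (3, [1, 0, 1])

def Spec_solution (n : Int) (tops : List Int) (out : Int) : Prop := out = solution_alt n tops
instance (n : Int) (tops : List Int) (out : Int) : Decidable (Spec_solution n tops out) := by unfold Spec_solution; infer_instance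

-- ===== CLAIM (what is proved, stated in full; the proofs are below) =====
def Claim_equal_solution : Prop := ∀ (n : Int) (tops : List Int), Dom_solution n tops → Pre_solution n tops → Spec_solution n tops (solution n tops)

-- ===== LEMMAS AND PROOFS =====

-- A's dp list after the two initial assignments, for a mountain of m columns
def dpInit (tops : List Int) (m : Nat) : List Int :=
  PySem.List.pySetD (PySem.List.pySetD (List.replicate (2 * m + 1) 0) 0 1) 1
    (if PySem.List.pyGetD tops 0 0 ≠ 0 then 3 else 2)

-- the rolling two-value recurrence both sides are related to in the proof
def solAltPair (st : Int × Int) (t : Int) : Int × Int :=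
  let c := PySem.Int.mod (st.2 + st.1 + (if t ≠ 0 then st.2 else 0)) 10007
  (c, PySem.Int.mod (c + st.2) 10007)

-- rolling state after k columns
def bState (tops : List Int) (k : Nat) : Int × Int :=
  (tops.take k).foldl solAltPair (1, 1)

-- B's matrix step applied to the column value itself (proof form of solutionAltStep)
def mPair (st : Int × Int × Int × Int) (t : Int) : Int × Int × Int × Int :=
  let w : Int := if t ≠ 0 then 2 else 1
  (PySem.Int.mod (st.1 + w * st.2.1) 10007,
   PySem.Int.mod (st.1 + (w + 1) * st.2.1) 10007,
   PySem.Int.mod (st.2.2.1 + w * st.2.2.2) 10007,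
   PySem.Int.mod (st.2.2.1 + (w + 1) * st.2.2.2) 10007)

-- B's matrix product after k columns
def mState (tops : List Int) (k : Nat) : Int × Int × Int × Int :=
  (tops.take k).foldl mPair (1, 0, 0, 1)

lemma pyGetD_set (xs : List Int) (n j : Nat) (v : Int) (hn : n < xs.length) :
    PySem.List.pyGetD (xs.set n v) (j : Int) 0 = if j = n then v else PySem.List.pyGetD xs (j : Int) 0 := by
  rw [← PySem.List.pySetD_natCast]
  exact PySem.List.pyGetD_pySetD_natCast xs n j v 0 hn

lemma solutionStep_odd (tops dp : List Int) (k : Nat) (hk : 1 ≤ k) :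
    solutionStep tops dp ((2 * k + 1 : Nat) : Int) =
      dp.set (2 * k + 1)
        (PySem.Int.mod (PySem.List.pyGetD dp ((2 * k : Nat) : Int) 0 + PySem.List.pyGetD dp ((2 * k - 1 : Nat) : Int) 0 +
          (if tops.getD k 0 ≠ 0 then PySem.List.pyGetD dp ((2 * k : Nat) : Int) 0 else 0)) 10007) := by
  unfold solutionStep
  have e1 : ((2 * k + 1 : Nat) : Int) - 1 = ((2 * k : Nat) : Int) := by push_cast; ring
  have e2 : ((2 * k + 1 : Nat) : Int) - 2 = ((2 * k - 1 : Nat) : Int) := by omega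
  have ed : PySem.Int.floordiv ((2 * k + 1 : Nat) : Int) 2 = (k : Int) := by
    rw [PySem.Int.floordiv_eq_ediv_of_pos (by norm_num)]; omega
  have em : PySem.Int.mod ((2 * k + 1 : Nat) : Int) 2 = 1 := by
    rw [PySem.Int.mod_eq_emod_of_pos (by norm_num)]; omega
  simp only [e1, e2, ed, em, ne_eq, one_ne_zero, not_false_eq_true, true_and,
    PySem.List.pyGetD_natCast tops, PySem.List.pySetD_natCast dp]
  split_ifs with h
  all_goals first
    | simp only [add_zero]
    | · rw [PySem.List.pySetD_natCast, List.set_set]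
        congr 1
        rw [PySem.Int.mod_eq_emod_of_pos (by norm_num), PySem.Int.mod_eq_emod_of_pos (by norm_num),
          PySem.Int.mod_eq_emod_of_pos (by norm_num)]
        omega

lemma solutionStep_even (tops dp : List Int) (k : Nat) (hk : 1 ≤ k) :
    solutionStep tops dp ((2 * k : Nat) : Int) =
      dp.set (2 * k)
        (PySem.Int.mod (PySem.List.pyGetD dp ((2 * k - 1 : Nat) : Int) 0 + PySem.List.pyGetD dp ((2 * k - 2 : Nat) : Int) 0) 10007) := by
  unfold solutionStep
  have e1 : ((2 * k : Nat) : Int) - 1 = ((2 * k - 1 : Nat) : Int) := by omega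
  have e2 : ((2 * k : Nat) : Int) - 2 = ((2 * k - 2 : Nat) : Int) := by omega
  have em : PySem.Int.mod ((2 * k : Nat) : Int) 2 = 0 := by
    rw [PySem.Int.mod_eq_emod_of_pos (by norm_num)]; omega
  simp only [e1, e2, em, ne_eq, not_true_eq_false, false_and, if_false,
    PySem.List.pySetD_natCast dp]

lemma dpInit_eq (tops : List Int) (m : Nat) :
    dpInit tops m = ((List.replicate (2 * m + 1) 0).set 0 1).set 1
      (if PySem.List.pyGetD tops 0 0 ≠ 0 then 3 else 2) := by
  unfold dpInit
  rw [PySem.List.pySetD_of_nonneg _ _ (by norm_num), PySem.List.pySetD_of_nonneg _ _ (by norm_num)]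
  norm_num

lemma dpInit_get1 (tops : List Int) (m : Nat) (hm : 1 ≤ m) :
    PySem.List.pyGetD (dpInit tops m) ((1 : Nat) : Int) 0 =
      (if PySem.List.pyGetD tops 0 0 ≠ 0 then 3 else 2) := by
  rw [dpInit_eq, pyGetD_set _ 1 1 _ (by simp; omega)]
  simp

lemma dpInit_get0 (tops : List Int) (m : Nat) (hm : 1 ≤ m) :
    PySem.List.pyGetD (dpInit tops m) ((0 : Nat) : Int) 0 = 1 := by
  rw [dpInit_eq, pyGetD_set _ 1 0 _ (by simp; omega)]
  rw [if_neg (by omega), pyGetD_set _ 0 0 _ (by simp)]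
  simp

lemma bState_zero (tops : List Int) : bState tops 0 = (1, 1) := by simp [bState]

lemma bState_succ (tops : List Int) (k : Nat) (hk : k < tops.length) :
    bState tops (k + 1) = solAltPair (bState tops k) (tops.getD k 0) := by
  unfold bState
  rw [List.take_add_one, List.getElem?_eq_getElem hk, Option.toList_some, List.foldl_append,
    List.foldl_cons, List.foldl_nil, List.getD_eq_getElem _ _ hk]

lemma mState_succ (tops : List Int) (k : Nat) (hk : k < tops.length) :
    mState tops (k + 1) = mPair (mState tops k) (tops.getD k 0) := by
  unfold mState
  rw [List.take_add_one, List.getElem?_eq_getElem hk, Option.toList_some, List.foldl_append,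
    List.foldl_cons, List.foldl_nil, List.getD_eq_getElem _ _ hk]

lemma solutionAltStep_natCast (tops : List Int) (st : Int × Int × Int × Int) (k : Nat) :
    solutionAltStep tops st ((k : Nat) : Int) = mPair st (tops.getD k 0) := by
  unfold solutionAltStep mPair
  rw [PySem.List.pyGetD_natCast tops]

lemma altFold_eq_mState (tops : List Int) (m : Nat) (hm : m ≤ tops.length) :
    (PySem.List.pyRange 0 ((m : Nat) : Int)).foldl (solutionAltStep tops) (1, 0, 0, 1) = mState tops m := by
  induction m with
  | zero => simp [mState, PySem.List.pyRange]
  | succ j ih =>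
    rw [show ((j + 1 : Nat) : Int) = ((j : Nat) : Int) + 1 by push_cast; ring,
      PySem.List.pyRange_one_succ_right (by omega), List.foldl_append,
      List.foldl_cons, List.foldl_nil, ih (by omega),
      solutionAltStep_natCast tops _ j, ← mState_succ tops j (by omega)]

-- the row-vector (1,1) applied to B's matrix product equals the rolling state
lemma mState_apply (tops : List Int) (k : Nat) (hk : k ≤ tops.length) :
    PySem.Int.mod ((mState tops k).1 + (mState tops k).2.2.1) 10007 = (bState tops k).1 ∧
    PySem.Int.mod ((mState tops k).2.1 + (mState tops k).2.2.2) 10007 = (bState tops k).2 := by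
  induction k with
  | zero =>
    simp only [mState, bState, List.take_zero, List.foldl_nil]
    decide
  | succ j ih =>
    obtain ⟨h1, h2⟩ := ih (by omega)
    rw [mState_succ tops j (by omega), bState_succ tops j (by omega)]
    rcases hms : mState tops j with ⟨a, b, c, d⟩
    rcases hbs : bState tops j with ⟨q, p⟩
    rw [hms, hbs] at h1 h2
    dsimp only [mPair, solAltPair] at h1 h2 ⊢
    simp only [PySem.Int.mod_eq_emod_of_pos (b := (10007 : Int)) (by norm_num)] at h1 h2 ⊢
    split_ifs with h
    · exact ⟨by omega, by omega⟩
    · exact ⟨by omega, by omega⟩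

lemma dp_invariant (tops : List Int) (m : Nat) (hm : 1 ≤ m) (hlen : m ≤ tops.length)
    (k : Nat) (hk1 : 1 ≤ k) (hkm : k ≤ m) :
    ((PySem.List.pyRange 2 (2 * (k : Int) + 1)).foldl (solutionStep tops) (dpInit tops m)).length = 2 * m + 1 ∧
    PySem.List.pyGetD ((PySem.List.pyRange 2 (2 * (k : Int) + 1)).foldl (solutionStep tops) (dpInit tops m)) ((2 * k - 1 : Nat) : Int) 0 = (bState tops k).1 ∧
    PySem.List.pyGetD ((PySem.List.pyRange 2 (2 * (k : Int) + 1)).foldl (solutionStep tops) (dpInit tops m)) ((2 * k : Nat) : Int) 0 = (bState tops k).2 := by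
  induction k with
  | zero => omega
  | succ k ih =>
    rcases Nat.eq_zero_or_pos k with rfl | hk
    · -- base: the single iteration i = 2
      have hr : PySem.List.pyRange 2 (2 * ((0 + 1 : Nat) : Int) + 1) = [((2 * 1 : Nat) : Int)] := by decide
      rw [hr]
      simp only [List.foldl_cons, List.foldl_nil]
      rw [solutionStep_even tops _ 1 le_rfl]
      have h1 : (2 * 1 - 1 : Nat) = 1 := by norm_num
      have h0 : (2 * 1 - 2 : Nat) = 0 := by norm_num
      rw [h1, h0, dpInit_get1 tops m hm, dpInit_get0 tops m hm]
      have hb : bState tops (0 + 1) = solAltPair (1, 1) (tops.getD 0 0) := by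
        rw [Nat.zero_add, ← bState_zero tops, ← bState_succ tops 0 (by omega)]
      refine ⟨by simp [List.length_set, dpInit_eq], ?_, ?_⟩
      · rw [pyGetD_set _ (2 * 1) 1 _ (by simp [dpInit_eq]; omega), if_neg (by omega),
          dpInit_get1 tops m hm, hb]
        simp only [solAltPair, PySem.List.pyGetD_zero]
        split_ifs with h
        · decide
        · decide
      · rw [pyGetD_set _ (2 * 1) (2 * (0 + 1)) _ (by simp [dpInit_eq]; omega), if_pos (by omega), hb]
        simp only [solAltPair, PySem.List.pyGetD_zero]
        congr 1
        split_ifs with h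
        · decide
        · decide
    · -- step: iterations i = 2k+1 and i = 2k+2
      obtain ⟨hL, hq, hp⟩ := ih hk (by omega)
      have hsplit : PySem.List.pyRange 2 (2 * ((k + 1 : Nat) : Int) + 1) =
          PySem.List.pyRange 2 (2 * (k : Int) + 1) ++ [((2 * k + 1 : Nat) : Int), ((2 * k + 2 : Nat) : Int)] := by
        rw [show (2 * ((k + 1 : Nat) : Int) + 1) = ((2 * k + 2 : Nat) : Int) + 1 by push_cast; ring,
          PySem.List.pyRange_one_succ_right (by push_cast; omega),
          show ((2 * k + 2 : Nat) : Int) = ((2 * k + 1 : Nat) : Int) + 1 by push_cast; ring,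
          PySem.List.pyRange_one_succ_right (by push_cast; omega),
          show ((2 * k + 1 : Nat) : Int) = 2 * (k : Int) + 1 by push_cast; ring]
        simp [List.append_assoc]
      rw [hsplit, List.foldl_append]
      simp only [List.foldl_cons, List.foldl_nil]
      set D := (PySem.List.pyRange 2 (2 * (k : Int) + 1)).foldl (solutionStep tops) (dpInit tops m) with hD
      rw [solutionStep_odd tops D k hk]
      set cB := PySem.Int.mod (PySem.List.pyGetD D ((2 * k : Nat) : Int) 0 +
        PySem.List.pyGetD D ((2 * k - 1 : Nat) : Int) 0 +
        (if tops.getD k 0 ≠ 0 then PySem.List.pyGetD D ((2 * k : Nat) : Int) 0 else 0)) 10007 with hcB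
      rw [show ((2 * k + 2 : Nat) : Int) = ((2 * (k + 1) : Nat) : Int) by push_cast; ring,
        solutionStep_even tops _ (k + 1) (by omega)]
      have e1 : (2 * (k + 1) - 1 : Nat) = 2 * k + 1 := by omega
      have e2 : (2 * (k + 1) - 2 : Nat) = 2 * k := by omega
      rw [e1, e2]
      have hset1 : 2 * k + 1 < D.length := by omega
      rw [pyGetD_set D (2 * k + 1) (2 * k + 1) cB hset1, if_pos rfl,
        pyGetD_set D (2 * k + 1) (2 * k) cB hset1, if_neg (by omega), hp]
      have hbs : bState tops (k + 1) = solAltPair (bState tops k) (tops.getD k 0) := by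
        exact bState_succ tops k (by omega)
      refine ⟨by simp [List.length_set, hL], ?_, ?_⟩
      · rw [pyGetD_set _ (2 * (k + 1)) (2 * k + 1) _ (by simp [List.length_set]; omega),
          if_neg (by omega), pyGetD_set D (2 * k + 1) (2 * k + 1) cB hset1, if_pos rfl, hbs]
        simp only [solAltPair, hcB, hq, hp]
      · rw [pyGetD_set _ (2 * (k + 1)) (2 * (k + 1)) _ (by simp [List.length_set]; omega),
          if_pos rfl, hbs]
        simp only [solAltPair, hcB, hq, hp]

lemma solution_eq_bState (n : Int) (tops : List Int) (h : Pre_solution n tops) :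
    solution n tops = (bState tops n.toNat).2 := by
  obtain ⟨hn1, hn2⟩ := h
  set m := n.toNat with hmdef
  have hn : n = (m : Int) := by omega
  have hm1 : 1 ≤ m := by omega
  have hml : m ≤ tops.length := by omega
  obtain ⟨hL, hq, hp⟩ := dp_invariant tops m hm1 hml m hm1 le_rfl
  unfold solution
  rw [hn]
  show PySem.List.pyGetD ((PySem.List.pyRange 2 (2 * (m : Int) + 1)).foldl (solutionStep tops)
      (PySem.List.pySetD (PySem.List.pySetD (List.replicate ((2 * (m : Int) + 1)).toNat 0) 0 1) 1
        (if PySem.List.pyGetD tops 0 0 ≠ 0 then 3 else 2))) (-1) 0 = (bState tops m).2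
  have hNt : ((2 : Int) * (m : Int) + 1).toNat = 2 * m + 1 := by omega
  rw [hNt]
  have hdpm : (PySem.List.pyRange 2 (2 * (m : Int) + 1)).foldl (solutionStep tops)
      (PySem.List.pySetD (PySem.List.pySetD (List.replicate (2 * m + 1) 0) 0 1) 1
        (if PySem.List.pyGetD tops 0 0 ≠ 0 then 3 else 2)) =
      (PySem.List.pyRange 2 (2 * (m : Int) + 1)).foldl (solutionStep tops) (dpInit tops m) := rfl
  rw [hdpm]
  set dpm := (PySem.List.pyRange 2 (2 * (m : Int) + 1)).foldl (solutionStep tops) (dpInit tops m) with hdef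
  rw [PySem.List.pyGetD_neg_ofNat dpm 1 0 (by omega) (by omega)]
  rw [PySem.List.pyGetD_eq_getElem dpm 0 (by positivity) (by push_cast; omega)] at hp
  have : dpm[dpm.length - 1]'(by omega) = dpm[((2 * m : Nat) : Int).toNat]'(by push_cast; omega) := by
    congr 1
    omega
  rw [this, hp]

lemma solution_alt_eq_bState (n : Int) (tops : List Int) (h : Pre_solution n tops) :
    solution_alt n tops = (bState tops n.toNat).2 := by
  obtain ⟨hn1, hn2⟩ := h
  set m := n.toNat with hmdef
  have hn : n = (m : Int) := by omega
  have hml : m ≤ tops.length := by omega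
  unfold solution_alt
  rw [hn, altFold_eq_mState tops m hml]
  exact (mState_apply tops m hml).2

-- ===== VERDICT (by name: the statement is the Claim_ definition above) =====
theorem solution_spec : Claim_equal_solution := by
  intro n tops _ hpre
  unfold Spec_solution
  rw [solution_eq_bState n tops hpre, solution_alt_eq_bState n tops hpre]
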